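-- pv_equiv track=rewrite | github.com/llukito/leetCode | 0773-sliding-puzzle/0773-sliding-puzzle.py | getIt
-- ===== SOURCE A (Python) =====
-- def getIt(string):
--     c = 0
--     r = 0
--     for i in range(len(string)):
--         if(string[i] == '0'):
--             return r,c
--         c+=1
--         if(c == 3):
--             c = 0
--             r = 1
--     return -1,-1
-- ===== SOURCE B (Python) =====
-- def getIt(string):
--     idx = string.find('0')
--     if idx == -1:
--         return (-1, -1)
--     return ((0 if idx < 3 else 1), idx % 3)
-- ===== Notes on version B (the rewrite author's own statement) =====
-- stated objective: faster
-- what changed: Replaces the explicit character scan with row/column counters by a single str.find lookup plus closed-form arithmetic (row = 0 iff index < 3, col = index % 3).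
import Mathlib
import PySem

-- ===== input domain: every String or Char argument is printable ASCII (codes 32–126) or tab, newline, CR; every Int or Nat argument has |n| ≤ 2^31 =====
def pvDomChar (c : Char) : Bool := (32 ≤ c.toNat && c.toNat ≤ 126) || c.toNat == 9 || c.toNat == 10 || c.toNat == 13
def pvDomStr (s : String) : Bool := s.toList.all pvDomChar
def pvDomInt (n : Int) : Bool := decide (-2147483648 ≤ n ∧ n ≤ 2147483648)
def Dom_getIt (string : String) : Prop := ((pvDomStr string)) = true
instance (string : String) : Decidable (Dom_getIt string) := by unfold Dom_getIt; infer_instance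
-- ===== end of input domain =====

-- B replaces A's counter-updating scan with a single find('0') plus closed-form arithmetic (measured faster in a timing run).

-- ===== PORT A =====
-- the for-loop over the characters with the counters c (column) and r (row)
def getItGo : List Char → Int → Int → Int × Int
  | [], _, _ => (-1, -1)
  | ch :: rest, c, r =>
    if ch = '0' then (r, c)
    else
      let c' := c + 1
      if c' = 3 then getItGo rest 0 1 else getItGo rest c' r

def getIt (string : String) : Int × Int := getItGo string.toList 0 0

-- ===== PORT B =====
def getIt_alt (string : String) : Int × Int :=
  if PySem.Str.find string "0" = -1 then (-1, -1)
  else ((if PySem.Str.find string "0" < 3 then 0 else 1),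
        PySem.Int.mod (PySem.Str.find string "0") 3)

-- ===== PRECONDITION & SPEC =====
def Spec_getIt (string : String) (out : Int × Int) : Prop := out = getIt_alt string
instance (string : String) (out : Int × Int) : Decidable (Spec_getIt string out) := by unfold Spec_getIt; infer_instance

-- ===== CLAIM (what is proved, stated in full; the proofs are below) =====
def Claim_equal_getIt : Prop := ∀ (string : String), Dom_getIt string → Spec_getIt string (getIt string)

-- ===== LEMMAS AND PROOFS =====

-- one-character prefix of a drop = that character at that index
theorem pv_prefix_drop_iff (l : List Char) (i : Nat) :
    ['0'] <+: l.drop i ↔ l[i]? = some '0' := by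
  constructor
  · rintro ⟨t, ht⟩
    have h : (l.drop i).head? = some '0' := by rw [← ht]; rfl
    simpa [List.head?_drop] using h
  · intro h
    have h' : (l.drop i).head? = some '0' := by simpa [List.head?_drop] using h
    obtain ⟨a, t, hat⟩ : ∃ a t, l.drop i = a :: t := by
      cases hd : l.drop i with
      | nil => rw [hd] at h'; simp at h'
      | cons a t => exact ⟨a, t, rfl⟩
    rw [hat] at h' ⊢
    simp at h'
    subst h'
    exact ⟨t, rfl⟩

-- PySem find of "0" computed via List.findIdx
theorem pv_find_zero (l : List Char) :
    PySem.Chars.find l ['0'] =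
      if l.findIdx (· = '0') < l.length then ((l.findIdx (· = '0') : Nat) : Int) else -1 := by
  by_cases hmem : '0' ∈ l
  · have hidx : l.findIdx (· = '0') < l.length := List.findIdx_lt_length.mpr ⟨'0', hmem, by simp⟩
    have hat : l[l.findIdx (· = '0')]? = some '0' := by
      have hg := @List.findIdx_getElem _ (· = '0') l hidx
      simp at hg
      simp [List.getElem?_eq_getElem hidx, hg]
    have hnn : 0 ≤ PySem.Chars.find l ['0'] := by
      rw [PySem.Chars.find_nonneg_iff]
      exact ((pv_prefix_drop_iff _ _).mpr hat).isInfix.trans (l.drop_suffix _).isInfix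
    obtain ⟨hpre, hmin⟩ := PySem.Chars.find_spec (s := l) (sub := ['0']) hnn
    have h1 : l[(PySem.Chars.find l ['0']).toNat]? = some '0' := (pv_prefix_drop_iff _ _).mp hpre
    have hle1 : l.findIdx (· = '0') ≤ (PySem.Chars.find l ['0']).toNat := by
      by_contra hlt
      push Not at hlt
      have hf := List.not_of_lt_findIdx hlt
      have hlen : (PySem.Chars.find l ['0']).toNat < l.length := lt_trans hlt hidx
      rw [List.getElem?_eq_getElem hlen] at h1
      simp at h1 hf
      exact hf h1
    have hle2 : (PySem.Chars.find l ['0']).toNat ≤ l.findIdx (· = '0') := by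
      by_contra hlt
      push Not at hlt
      exact hmin _ hlt ((pv_prefix_drop_iff _ _).mpr hat)
    have he : (PySem.Chars.find l ['0']).toNat = l.findIdx (· = '0') := le_antisymm hle2 hle1
    rw [if_pos hidx, ← he]
    omega
  · have hidx : ¬ l.findIdx (· = '0') < l.length := by
      intro hlt
      have hg := @List.findIdx_getElem _ (· = '0') l hlt
      simp at hg
      exact hmem (hg ▸ l.getElem_mem hlt)
    rw [if_neg hidx]
    rw [PySem.Chars.find_eq_neg_one_iff]
    intro hinf
    have hex := PySem.Chars.exists_prefix_drop_iff_isIn (sub := ['0']) (s := l)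
    rw [PySem.Chars.isIn_iff_infix] at hex
    obtain ⟨j, hj⟩ := hex.mpr hinf
    exact hmem (List.mem_of_getElem? ((pv_prefix_drop_iff _ _).mp hj))

-- loop invariant: after k processed characters the counters are c = k % 3, r = [k >= 3]
theorem pv_go_spec (l : List Char) : ∀ (k : Nat),
    getItGo l ((k % 3 : Nat) : Int) (if k < 3 then 0 else 1) =
      (if l.findIdx (· = '0') < l.length
       then ((if k + l.findIdx (· = '0') < 3 then (0 : Int) else 1),
             (((k + l.findIdx (· = '0')) % 3 : Nat) : Int))
       else (-1, -1)) := by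
  induction l with
  | nil => intro k; simp [getItGo]
  | cons a t ih =>
    intro k
    by_cases ha : a = '0'
    · subst ha
      have h0 : (('0') :: t).findIdx (· = '0') = 0 := by simp [List.findIdx_cons]
      have hlt : (('0') :: t).findIdx (· = '0') < ('0' :: t).length := by simp [h0]
      rw [if_pos hlt, h0]
      simp [getItGo]
    · have hfi : (a :: t).findIdx (· = '0') = t.findIdx (· = '0') + 1 := by
        simp [List.findIdx_cons, ha]
      have hstep : getItGo (a :: t) ((k % 3 : Nat) : Int) (if k < 3 then 0 else 1) =
          getItGo t (((k + 1) % 3 : Nat) : Int) (if k + 1 < 3 then 0 else 1) := by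
        simp only [getItGo, if_neg ha]
        by_cases h2 : k % 3 = 2
        · have e1 : ((k % 3 : Nat) : Int) + 1 = 3 := by omega
          have e2 : (((k + 1) % 3 : Nat) : Int) = 0 := by omega
          have e3 : ¬ k + 1 < 3 := by omega
          rw [if_pos e1, e2, if_neg e3]
        · have e1 : ¬ (((k % 3 : Nat) : Int) + 1 = 3) := by omega
          have e2 : (((k + 1) % 3 : Nat) : Int) = ((k % 3 : Nat) : Int) + 1 := by omega
          have e3 : (if k + 1 < 3 then (0 : Int) else 1) = (if k < 3 then 0 else 1) := by
            by_cases h' : k + 1 < 3 <;> by_cases h'' : k < 3 <;>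
              simp [h', h''] <;> omega
          rw [if_neg e1, e2, e3]
      rw [hstep, ih (k + 1), hfi]
      by_cases hj : t.findIdx (· = '0') < t.length
      · have hj' : t.findIdx (· = '0') + 1 < (a :: t).length := by
          simp only [List.length_cons]; omega
        rw [if_pos hj, if_pos hj']
        have harith : k + 1 + t.findIdx (· = '0') = k + (t.findIdx (· = '0') + 1) := by omega
        rw [harith]
      · have hj' : ¬ t.findIdx (· = '0') + 1 < (a :: t).length := by
          simp only [List.length_cons]
          omega
        rw [if_neg hj, if_neg hj']

-- ===== VERDICT (by name: the statement is the Claim_ definition above) =====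
theorem getIt_spec : Claim_equal_getIt := by
  intro s _
  unfold Spec_getIt getIt getIt_alt
  have h := pv_go_spec s.toList 0
  simp only [Nat.zero_mod, Nat.cast_zero, zero_add,
    if_pos (by norm_num : (0 : Nat) < 3)] at h
  have hf := pv_find_zero s.toList
  have h0 : ("0" : String).toList = ['0'] := by decide
  have hbr : PySem.Str.find s "0" = PySem.Chars.find s.toList ['0'] := by simp [h0]
  rw [h, hbr, hf]
  by_cases hj : s.toList.findIdx (· = '0') < s.toList.length
  · simp only [if_pos hj]
    have hne : ¬ ((s.toList.findIdx (· = '0') : Nat) : Int) = -1 := by omega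
    rw [if_neg hne, Prod.mk.injEq]
    refine ⟨?_, ?_⟩
    · by_cases h3 : s.toList.findIdx (· = '0') < 3
      · rw [if_pos h3, if_pos (by omega : ((s.toList.findIdx (· = '0') : Nat) : Int) < 3)]
      · rw [if_neg h3, if_neg (by omega : ¬ ((s.toList.findIdx (· = '0') : Nat) : Int) < 3)]
    · have hm := PySem.Int.mod_natCast (s.toList.findIdx (· = '0')) 3
      exact_mod_cast hm.symm
  · simp only [if_neg hj]
    norm_num
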